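-- pv_equiv track=rewrite | github.com/MBZUAI-Paris/dialogforge | src/dlgforge/pipeline/runner.py | _sanitize_language_tag
-- ===== SOURCE A (Python) =====
-- def _sanitize_language_tag(language: str) -> str:
--     text = str(language or "").strip().lower()
--     if not text:
--         return "lang"
--     chars = [ch if ch.isalnum() else "-" for ch in text]
--     token = "".join(chars).strip("-")
--     while "--" in token:
--         token = token.replace("--", "-")
--     return token or "lang"
-- ===== SOURCE B (Python) =====
-- def _sanitize_language_tag(language: str) -> str:
--     text = str(language or "").strip().lower()
--     out = []
--     for ch in text:
--         if ch.isalnum():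
--             out.append(ch)
--         elif out and out[-1] != "-":
--             out.append("-")
--     if out and out[-1] == "-":
--         out.pop()
--     return "".join(out) or "lang"
-- ===== Notes on version B (the rewrite author's own statement) =====
-- stated objective: alternative
-- what changed: Replaces the map/join/strip('-')/while-replace pipeline with a single left-to-right pass that appends alnum chars and emits a dash only when the accumulator is non-empty and does not already end in one, dropping a single trailing dash at the end.
import Mathlib
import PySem

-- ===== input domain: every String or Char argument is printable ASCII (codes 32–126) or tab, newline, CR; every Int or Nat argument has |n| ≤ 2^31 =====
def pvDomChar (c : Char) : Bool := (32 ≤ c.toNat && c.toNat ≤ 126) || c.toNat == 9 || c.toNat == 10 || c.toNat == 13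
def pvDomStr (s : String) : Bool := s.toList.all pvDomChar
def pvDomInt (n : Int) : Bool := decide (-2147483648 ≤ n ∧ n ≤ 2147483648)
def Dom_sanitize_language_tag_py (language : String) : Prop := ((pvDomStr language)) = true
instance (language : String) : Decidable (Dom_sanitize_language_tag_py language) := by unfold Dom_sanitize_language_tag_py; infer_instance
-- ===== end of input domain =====

-- B replaces A's map/join/strip('-')/while-replace pipeline by a single pass that
-- collapses dash runs and suppresses a leading/trailing dash inline (alternative, not claimed faster).

-- ===== PORT A =====
-- the 'while "--" in token' loop; fuel (initially token.length, enough since each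
-- replace shrinks a token containing "--") only makes the same computation total
def pvCollapseLoop : Nat → List Char → List Char
  | 0, token => token
  | fuel+1, token =>
    if PySem.Chars.isIn ['-', '-'] token then
      pvCollapseLoop fuel (PySem.Chars.replace token ['-', '-'] ['-'])
    else token

def sanitize_language_tag_py (language : String) : String :=
  let text := PySem.Chars.lower (PySem.Chars.strip (if language = "" then "" else language).toList)
  if text.isEmpty then "lang"
  else
    let chars := text.map (fun ch => if PySem.Chars.isalnum ch then ch else '-')
    let token := PySem.Chars.stripChars chars ['-']
    let token := pvCollapseLoop token.length token
    if token.isEmpty then "lang" else String.mk token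

-- ===== PORT B =====
def sanitize_language_tag_py_alt (language : String) : String :=
  let text := PySem.Chars.lower (PySem.Chars.strip (if language = "" then "" else language).toList)
  let out := text.foldl (fun acc ch =>
    if PySem.Chars.isalnum ch then acc ++ [ch]
    else if acc ≠ [] ∧ acc.getLast? ≠ some '-' then acc ++ ['-']
    else acc) []
  let out := if out ≠ [] ∧ out.getLast? = some '-' then out.dropLast else out
  if out.isEmpty then "lang" else String.mk out

-- ===== PRECONDITION & SPEC =====
def Spec_sanitize_language_tag_py (language : String) (out : String) : Prop := out = sanitize_language_tag_py_alt language
instance (language : String) (out : String) : Decidable (Spec_sanitize_language_tag_py language out) := by unfold Spec_sanitize_language_tag_py; infer_instance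

-- ===== CLAIM (what is proved, stated in full; the proofs are below) =====
def Claim_equal_sanitize_language_tag_py : Prop := ∀ (language : String), Dom_sanitize_language_tag_py language → Spec_sanitize_language_tag_py language (sanitize_language_tag_py language)

-- ===== LEMMAS AND PROOFS =====

-- one replace pass, written as the simple scan replace.go performs when fuel suffices
def pvR : List Char → List Char
  | [] => []
  | c :: t =>
    if ['-', '-'].isPrefixOf (c :: t) then '-' :: pvR ((c :: t).drop 2)
    else c :: pvR t
termination_by l => l.length
decreasing_by all_goals simp

-- one step of the canonical "collapse adjacent dashes" normal form (built right-to-left)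
def pvStep (c : Char) (x : List Char) : List Char :=
  if c = '-' ∧ x.head? = some '-' then x else c :: x

def pvSq (l : List Char) : List Char := l.foldr pvStep []

def pvHasDD : List Char → Bool
  | a :: b :: r => (a = '-' && b = '-') || pvHasDD (b :: r)
  | _ => false

def pvEmit : Bool → List Char → List Char
  | _, [] => []
  | b, c :: r =>
    if PySem.Chars.isalnum c then c :: pvEmit true r
    else if b then '-' :: pvEmit false r
    else pvEmit false r

def pvF : Char → Char := fun ch => if PySem.Chars.isalnum ch then ch else '-'

theorem pvStep_dash_idem (x : List Char) : pvStep '-' (pvStep '-' x) = pvStep '-' x := by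
  unfold pvStep; split_ifs with h1 h2 h3 <;> simp_all

theorem pvStep_ne (c : Char) (x : List Char) (h : c ≠ '-') : pvStep c x = c :: x := by
  unfold pvStep; split_ifs with h1; exact absurd h1.1 h; rfl

theorem pvEmit_nil (b : Bool) : pvEmit b [] = [] := by cases b <;> rfl

theorem pvAlnum_ne_dash (c : Char) (h : PySem.Chars.isalnum c = true) : c ≠ '-' := by
  intro hc; subst hc; exact absurd h (by decide)

theorem pvFoldr_getLast? (l : List Char) (acc : List Char) (h : acc ≠ []) :
    (List.foldr pvStep acc l).getLast? = acc.getLast? ∧ List.foldr pvStep acc l ≠ [] := by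
  induction l with
  | nil => exact ⟨rfl, h⟩
  | cons c r ih =>
    obtain ⟨h1, h2⟩ := ih
    simp only [List.foldr_cons]
    cases hacc : List.foldr pvStep acc r with
    | nil => exact absurd hacc h2
    | cons a b =>
      rw [hacc] at h1
      unfold pvStep
      split_ifs with hc
      · exact ⟨h1, by simp⟩
      · exact ⟨by rw [List.getLast?_cons_cons]; exact h1, by simp⟩

theorem pvS (r : List Char) :
    pvStep '-' (pvSq r) = '-' :: pvSq (r.dropWhile (· = '-')) := by
  induction r with
  | nil => simp [pvSq, pvStep]
  | cons a r ih =>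
    by_cases ha : a = '-'
    · subst ha
      have : pvSq ('-' :: r) = pvStep '-' (pvSq r) := rfl
      rw [this, pvStep_dash_idem, ih]
      simp
    · have h1 : pvSq (a :: r) = a :: pvSq r := by
        show pvStep a (pvSq r) = _
        unfold pvStep; split_ifs with h; exact absurd h.1 ha; rfl
      rw [h1, List.dropWhile_cons_of_neg (by simpa using ha), h1]
      unfold pvStep
      simp [ha]

theorem pvDD_infix (t : List Char) : ['-', '-'] <:+: t ↔ pvHasDD t = true := by
  induction t with
  | nil => simp [pvHasDD]
  | cons c r ih =>
    rw [List.infix_cons_iff, ih]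
    cases r with
    | nil => simp [pvHasDD, List.cons_prefix_cons]
    | cons b r2 =>
      have e : pvHasDD (c :: b :: r2) = ((c = '-' && b = '-') || pvHasDD (b :: r2)) := rfl
      rw [e]
      constructor
      · rintro (hpre | hdd)
        · rw [List.cons_prefix_cons, List.cons_prefix_cons] at hpre
          obtain ⟨h1, h2, -⟩ := hpre
          simp [h1.symm, h2.symm]
        · simp [hdd]
      · intro h
        rcases (Bool.or_eq_true _ _).mp h with h | h
        · rcases (Bool.and_eq_true _ _).mp h with ⟨h1, h2⟩
          refine Or.inl ?_
          rw [List.cons_prefix_cons, List.cons_prefix_cons]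
          exact ⟨(of_decide_eq_true h1).symm, (of_decide_eq_true h2).symm, List.nil_prefix⟩
        · exact Or.inr h

theorem pvHasDD_iff (t : List Char) : PySem.Chars.isIn ['-', '-'] t = pvHasDD t := by
  cases hdd : pvHasDD t with
  | false =>
    rw [PySem.Chars.isIn_eq_false_iff]
    intro hinf
    rw [(pvDD_infix t).mp hinf] at hdd
    simp at hdd
  | true => rw [(PySem.Chars.isIn_iff_infix _ _).mpr ((pvDD_infix t).mpr hdd)]

theorem pvSq_of_not_hasDD (t : List Char) (h : pvHasDD t = false) : pvSq t = t := by
  induction t with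
  | nil => rfl
  | cons c r ih =>
    have hr : pvHasDD r = false := by
      cases r with
      | nil => rfl
      | cons b r2 => unfold pvHasDD at h; simp at h; exact h.2
    have : pvSq (c :: r) = pvStep c (pvSq r) := rfl
    rw [this, ih hr]
    unfold pvStep
    split_ifs with hc
    · exfalso
      obtain ⟨hc1, hc2⟩ := hc
      cases r with
      | nil => simp at hc2
      | cons b r2 =>
        simp at hc2
        unfold pvHasDD at h
        simp [hc1, hc2] at h
    · rfl

theorem pvR_go (fuel : Nat) (l acc : List Char) (h : l.length ≤ fuel) :
    PySem.Chars.replace.go ['-', '-'] ['-'] fuel l acc = acc.reverse ++ pvR l := by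
  induction fuel generalizing l acc with
  | zero =>
    have : l = [] := List.length_eq_zero_iff.mp (Nat.le_zero.mp h)
    subst this
    simp [PySem.Chars.replace.go, pvR]
  | succ n ih =>
    cases l with
    | nil => simp [PySem.Chars.replace.go, pvR]
    | cons c t =>
      rw [PySem.Chars.replace.go, pvR]
      by_cases hp : ['-', '-'].isPrefixOf (c :: t) = true
      · rw [if_pos hp, if_pos hp]
        have e1 : List.drop (['-', '-'].length) (c :: t) = List.drop 2 (c :: t) := rfl
        have e2 : (['-'].reverse ++ acc) = '-' :: acc := rfl
        rw [e1, e2, ih ((c :: t).drop 2) ('-' :: acc) (by simp at h ⊢; omega)]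
        simp
      · rw [if_neg hp, if_neg hp]
        rw [ih t (c :: acc) (by simp at h; omega)]
        simp

theorem pvReplace_eq_R (t : List Char) :
    PySem.Chars.replace t ['-', '-'] ['-'] = pvR t := by
  unfold PySem.Chars.replace
  rw [if_neg (by simp)]
  rw [pvR_go t.length t [] le_rfl]
  simp

theorem pvR_len_le (t : List Char) : (pvR t).length ≤ t.length := by
  induction t using pvR.induct with
  | case1 => simp [pvR]
  | case2 c t hp ih =>
    rw [pvR]; simp only [if_pos hp, List.length_cons, List.length_drop] at *; omega
  | case3 c t hp ih =>
    rw [pvR]; simp only [if_neg hp, List.length_cons] at *; omega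

theorem pvR_len_lt (t : List Char) (h : pvHasDD t = true) : (pvR t).length < t.length := by
  induction t using pvR.induct with
  | case1 => simp [pvHasDD] at h
  | case2 c t hp ih =>
    rw [pvR]
    have ht : t ≠ [] := by rintro rfl; simp [List.isPrefixOf] at hp
    have h2 := pvR_len_le ((c :: t).drop 2)
    have h3 : 0 < t.length := List.length_pos_iff.mpr ht
    simp only [if_pos hp, List.length_cons, List.length_drop] at *
    omega
  | case3 c t hp ih =>
    rw [pvR]
    simp only [if_neg hp, List.length_cons]
    cases t with
    | nil => simp [pvHasDD] at h
    | cons b r =>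
      have hd : pvHasDD (b :: r) = true := by
        unfold pvHasDD at h
        simp [List.isPrefixOf] at hp h
        rcases h with ⟨h1, h2⟩ | h
        · exact absurd h2.symm (hp h1.symm)
        · exact h
      have := ih hd
      omega

theorem pvSq_R (t : List Char) : pvSq (pvR t) = pvSq t := by
  induction t using pvR.induct with
  | case1 => simp [pvR]
  | case2 c t hp ih =>
    rw [pvR, if_pos hp]
    cases t with
    | nil => simp [List.isPrefixOf] at hp
    | cons b r =>
      simp [List.isPrefixOf] at hp
      obtain ⟨hc, hb⟩ := hp
      subst hc; subst hb
      simp only [List.drop_succ_cons, List.drop_zero] at ih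
      show pvStep '-' (pvSq (pvR r)) = pvSq ('-' :: '-' :: r)
      have hr : pvSq ('-' :: '-' :: r) = pvStep '-' (pvStep '-' (pvSq r)) := rfl
      rw [hr, pvStep_dash_idem, ih]
  | case3 c t hp ih =>
    rw [pvR]; simp [hp]
    show pvStep c (pvSq (pvR t)) = pvStep c (pvSq t)
    rw [ih]

theorem pvLoop_eq_sq (fuel : Nat) (t : List Char) (h : t.length ≤ fuel) :
    pvCollapseLoop fuel t = pvSq t := by
  induction fuel generalizing t with
  | zero =>
    have : t = [] := List.length_eq_zero_iff.mp (Nat.le_zero.mp h)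
    subst this; rfl
  | succ n ih =>
    rw [pvCollapseLoop]
    rw [pvHasDD_iff]
    by_cases hd : pvHasDD t = true
    · rw [if_pos hd, pvReplace_eq_R]
      have hlt := pvR_len_lt t hd
      rw [ih _ (by omega), pvSq_R]
    · rw [if_neg (by simpa using hd), pvSq_of_not_hasDD t (by simpa using hd)]

theorem pvV (l : List Char) :
    List.foldr pvStep ['-'] l =
      if (pvSq l).getLast? = some '-' then pvSq l else pvSq l ++ ['-'] := by
  induction l with
  | nil => simp [pvSq]
  | cons c l ih =>
    simp only [List.foldr_cons, ih]
    have hsq : pvSq (c :: l) = pvStep c (pvSq l) := rfl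
    by_cases hl : (pvSq l).getLast? = some '-'
    · rw [if_pos hl]
      have hne : pvSq l ≠ [] := by intro h0; rw [h0] at hl; simp at hl
      have hlast : (pvStep c (pvSq l)).getLast? = some '-' := by
        unfold pvStep
        split_ifs
        · exact hl
        · cases hx : pvSq l with
          | nil => exact absurd hx hne
          | cons a b => rw [hx] at hl; rw [List.getLast?_cons_cons]; exact hl
      rw [hsq, if_pos hlast]
    · rw [if_neg hl]
      by_cases hc : c = '-'
      · subst hc
        cases hx : pvSq l with
        | nil =>
          have h1 : pvStep '-' ([] ++ ['-']) = ['-'] := by unfold pvStep; simp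
          have h2 : pvSq ('-' :: l) = ['-'] := by
            rw [hsq, hx]; unfold pvStep; simp
          rw [h1, h2]; simp
        | cons a b =>
          by_cases ha : a = '-'
          · subst ha
            have h1 : pvStep '-' (('-' :: b) ++ ['-']) = ('-' :: b) ++ ['-'] := by
              unfold pvStep; simp
            have h2 : pvSq ('-' :: l) = '-' :: b := by
              rw [hsq, hx]; unfold pvStep; simp
            rw [h1, h2]
            rw [hx] at hl
            rw [if_neg hl]
          · have h1 : pvStep '-' ((a :: b) ++ ['-']) = '-' :: ((a :: b) ++ ['-']) := by
              unfold pvStep; simp [ha]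
            have h2 : pvSq ('-' :: l) = '-' :: a :: b := by
              rw [hsq, hx]; unfold pvStep; simp [ha]
            rw [h1, h2]
            rw [hx] at hl
            rw [List.getLast?_cons_cons, if_neg hl]
            simp
      · rw [pvStep_ne _ _ hc, hsq, pvStep_ne _ _ hc]
        cases hx : pvSq l with
        | nil =>
          rw [show (c :: ([] : List Char)).getLast? = some c from rfl,
            if_neg (by simp [hc])]
          simp
        | cons a b =>
          rw [hx] at hl
          rw [List.getLast?_cons_cons, if_neg hl]
          simp

-- T: dropping B's single trailing dash = A's right strip of all dashes, under pvSq
theorem pvT (u : List Char) :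
    (if pvSq u ≠ [] ∧ (pvSq u).getLast? = some '-' then (pvSq u).dropLast else pvSq u) =
      pvSq ((u.reverse.dropWhile (· = '-')).reverse) := by
  induction u using List.reverseRecOn with
  | nil => simp [pvSq]
  | append_singleton u c ih =>
    have hfold : pvSq (u ++ [c]) = List.foldr pvStep (pvStep c []) u := by
      unfold pvSq; rw [List.foldr_append]; rfl
    by_cases hc : c = '-'
    · subst hc
      have h1 : pvSq (u ++ ['-']) = List.foldr pvStep ['-'] u := by
        rw [hfold]; rfl
      have h2 : ((u ++ ['-']).reverse.dropWhile (· = '-')).reverse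
          = (u.reverse.dropWhile (· = '-')).reverse := by
        simp
      rw [h1, h2, pvV]
      by_cases hl : (pvSq u).getLast? = some '-'
      · rw [if_pos hl]
        exact ih
      · rw [if_neg hl, if_pos ⟨by simp, by simp⟩]
        rw [if_neg (by simp [hl])] at ih
        simpa using ih
    · have h2 : ((u ++ [c]).reverse.dropWhile (· = '-')).reverse = u ++ [c] := by
        simp [hc]
      rw [h2]
      have hstep : pvStep c [] = [c] := by unfold pvStep; simp
      have hlast : (pvSq (u ++ [c])).getLast? = some c := by
        rw [hfold, hstep]
        exact (pvFoldr_getLast? u [c] (by simp)).1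
      rw [if_neg (by rw [hlast]; simp [hc])]

theorem pvEmit_eq_sq (text : List Char) :
    pvEmit false text = pvSq ((text.map pvF).dropWhile (· = '-')) ∧
      pvEmit true text = pvSq (text.map pvF) := by
  induction text with
  | nil => simp [pvEmit, pvSq]
  | cons c r ih =>
    obtain ⟨ih1, ih2⟩ := ih
    by_cases hc : PySem.Chars.isalnum c = true
    · have hfc : pvF c = c := by unfold pvF; rw [if_pos hc]
      have hne := pvAlnum_ne_dash c hc
      constructor
      · show pvEmit false (c :: r) = _
        unfold pvEmit
        rw [if_pos hc]
        simp only [List.map_cons, hfc]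
        rw [List.dropWhile_cons_of_neg (by simpa using hne)]
        show c :: pvEmit true r = pvStep c (pvSq (r.map pvF))
        rw [pvStep_ne _ _ hne, ih2]
      · show pvEmit true (c :: r) = _
        unfold pvEmit
        rw [if_pos hc]
        simp only [List.map_cons, hfc]
        show c :: pvEmit true r = pvStep c (pvSq (r.map pvF))
        rw [pvStep_ne _ _ hne, ih2]
    · have hfc : pvF c = '-' := by unfold pvF; rw [if_neg hc]
      constructor
      · show pvEmit false (c :: r) = _
        unfold pvEmit
        rw [if_neg hc, if_neg (by simp)]
        simp only [List.map_cons, hfc]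
        rw [List.dropWhile_cons_of_pos (by simp)]
        exact ih1
      · show pvEmit true (c :: r) = _
        unfold pvEmit
        rw [if_neg hc, if_pos rfl]
        simp only [List.map_cons, hfc]
        show '-' :: pvEmit false r = pvStep '-' (pvSq (r.map pvF))
        rw [pvS, ih1]

theorem pvFoldl_eq_emit (text : List Char) (acc : List Char) :
    text.foldl (fun acc ch =>
      if PySem.Chars.isalnum ch then acc ++ [ch]
      else if acc ≠ [] ∧ acc.getLast? ≠ some '-' then acc ++ ['-']
      else acc) acc = acc ++ pvEmit (decide (acc ≠ [] ∧ acc.getLast? ≠ some '-')) text := by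
  induction text generalizing acc with
  | nil => simp [pvEmit_nil]
  | cons c r ih =>
    simp only [List.foldl_cons]
    by_cases hc : PySem.Chars.isalnum c = true
    · rw [if_pos hc, ih]
      have hne := pvAlnum_ne_dash c hc
      have hflag : decide (acc ++ [c] ≠ [] ∧ (acc ++ [c]).getLast? ≠ some '-') = true := by
        simp [hne]
      rw [hflag]
      show acc ++ [c] ++ pvEmit true r = acc ++ pvEmit (decide (acc ≠ [] ∧ acc.getLast? ≠ some '-')) (c :: r)
      have : pvEmit (decide (acc ≠ [] ∧ acc.getLast? ≠ some '-')) (c :: r) = c :: pvEmit true r := by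
        simp [pvEmit, hc]
      rw [this, List.append_assoc]; rfl
    · rw [if_neg hc]
      by_cases hf : acc ≠ [] ∧ acc.getLast? ≠ some '-'
      · rw [if_pos hf, ih]
        have hflag : decide (acc ++ ['-'] ≠ [] ∧ (acc ++ ['-']).getLast? ≠ some '-') = false := by
          simp
        rw [hflag]
        have : pvEmit (decide (acc ≠ [] ∧ acc.getLast? ≠ some '-')) (c :: r) = '-' :: pvEmit false r := by
          rw [decide_eq_true hf]; simp [pvEmit, hc]
        rw [this, List.append_assoc]; rfl
      · rw [if_neg hf, ih]
        have : pvEmit (decide (acc ≠ [] ∧ acc.getLast? ≠ some '-')) (c :: r) = pvEmit false r := by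
          rw [decide_eq_false hf]; simp [pvEmit, hc]
        rw [this]
        have hflag : decide (acc ≠ [] ∧ acc.getLast? ≠ some '-') = false := by
          simpa using hf
        rw [hflag]

-- ===== VERDICT (by name: the statement is the Claim_ definition above) =====
theorem sanitize_language_tag_py_spec : Claim_equal_sanitize_language_tag_py := by
  intro language _
  show sanitize_language_tag_py language = sanitize_language_tag_py_alt language
  unfold sanitize_language_tag_py sanitize_language_tag_py_alt
  dsimp only []
  set text := PySem.Chars.lower (PySem.Chars.strip (if language = "" then "" else language).toList) with htext
  by_cases ht : text.isEmpty
  · rw [if_pos ht]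
    have h0 : text = [] := by simpa using ht
    rw [h0]
    simp
  · rw [if_neg ht]
    rw [pvFoldl_eq_emit]
    have hflag : decide (([] : List Char) ≠ [] ∧ ([] : List Char).getLast? ≠ some '-') = false := by
      simp
    rw [hflag, List.nil_append]
    rw [(pvEmit_eq_sq text).1]
    rw [pvLoop_eq_sq _ _ le_rfl]
    have hp : (fun c => (['-'] : List Char).contains c) = (fun c => decide (c = '-')) := by
      funext c; by_cases h : c = '-' <;> simp [h]
    have hstrip : PySem.Chars.stripChars (text.map pvF) ['-'] =
        (((text.map pvF).dropWhile (fun c => decide (c = '-'))).reverse.dropWhile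
          (fun c => decide (c = '-'))).reverse := by
      unfold PySem.Chars.stripChars
      rw [hp]
    rw [show (text.map fun ch => if PySem.Chars.isalnum ch then ch else '-') = text.map pvF from rfl]
    rw [hstrip]
    rw [← pvT ((text.map pvF).dropWhile (fun c => decide (c = '-')))]
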